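-- pv_equiv track=rewrite | github.com/Jasonshengxi/comp_sci | describe.py | hangman
-- ===== SOURCE A (Python) =====
-- from string import ascii_letters
--
-- def hangman(x: str) -> str:
--     out = ""
--     for c in x:
--         if c in ascii_letters:
--             out += "_"
--         else:
--             out += c
--     return out
-- ===== SOURCE B (Python) =====
-- def hangman(x: str) -> str:
--     # Run-based: scan maximal runs of letters / non-letters, emit '_'*runlen
--     # or the untouched slice, and join the pieces at the end.
--     def is_letter(c):
--         return 'A' <= c <= 'Z' or 'a' <= c <= 'z'
--
--     pieces = []
--     i, n = 0, len(x)
--     while i < n: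
--         j = i
--         if is_letter(x[i]):
--             while j < n and is_letter(x[j]):
--                 j += 1
--             pieces.append('_' * (j - i))
--         else:
--             while j < n and not is_letter(x[j]):
--                 j += 1
--             pieces.append(x[i:j])
--         i = j
--     return ''.join(pieces)
-- ===== Notes on version B (the rewrite author's own statement) =====
-- stated objective: alternative
-- what changed: B scans maximal runs of letters/non-letters with an indexed two-level while loop, emitting a run of underscores of the run's length for a letter run and the untouched slice otherwise, then joins the pieces; A accumulates character by character with a membership test against ascii_letters.
import Mathlib
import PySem

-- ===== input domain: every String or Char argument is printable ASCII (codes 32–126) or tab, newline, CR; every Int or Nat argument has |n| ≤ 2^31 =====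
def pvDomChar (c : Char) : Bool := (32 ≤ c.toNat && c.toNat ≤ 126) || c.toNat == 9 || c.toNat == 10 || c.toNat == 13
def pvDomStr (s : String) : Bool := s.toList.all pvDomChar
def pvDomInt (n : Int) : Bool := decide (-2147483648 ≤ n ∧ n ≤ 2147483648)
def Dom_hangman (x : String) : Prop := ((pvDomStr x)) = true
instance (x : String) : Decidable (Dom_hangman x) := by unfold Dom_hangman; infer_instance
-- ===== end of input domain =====

-- B replaces A's per-character accumulate-with-membership-test by a run-length scan:
-- maximal letter runs become '_'*runlen, non-letter runs are copied as slices, pieces joined (objective: alternative).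

-- ===== PORT A =====
-- string.ascii_letters
def lettersA : List Char := ['a', 'b', 'c', 'd', 'e', 'f', 'g', 'h', 'i', 'j', 'k', 'l', 'm', 'n', 'o', 'p', 'q', 'r', 's', 't', 'u', 'v', 'w', 'x', 'y', 'z', 'A', 'B', 'C', 'D', 'E', 'F', 'G', 'H', 'I', 'J', 'K', 'L', 'M', 'N', 'O', 'P', 'Q', 'R', 'S', 'T', 'U', 'V', 'W', 'X', 'Y', 'Z']

def hangman (x : String) : String :=
  String.mk (x.toList.foldl
    (fun out c => out ++ (if PySem.Chars.isIn [c] lettersA then ['_'] else [c])) [])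

-- ===== PORT B =====
-- def is_letter(c): return 'A' <= c <= 'Z' or 'a' <= c <= 'z'
def isLetterB (c : Char) : Bool :=
  (65 ≤ c.toNat && c.toNat ≤ 90) || (97 ≤ c.toNat && c.toNat ≤ 122)

-- The index while-loops of Source B scan the maximal run at the current position;
-- on the remaining character list this is takeWhile/dropWhile on the run predicate.
def runScanB (l : List Char) : List (List Char) :=
  match l with
  | [] => []
  | c :: cs =>
    if isLetterB c then
      -- pieces.append('_' * (j - i))
      List.replicate (1 + (cs.takeWhile isLetterB).length) '_'
        :: runScanB (cs.dropWhile isLetterB)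
    else
      -- pieces.append(x[i:j])
      (c :: cs.takeWhile (fun d => !isLetterB d))
        :: runScanB (cs.dropWhile (fun d => !isLetterB d))
termination_by l.length
decreasing_by
  · exact Nat.lt_succ_of_le (cs.length_dropWhile_le _)
  · exact Nat.lt_succ_of_le (cs.length_dropWhile_le _)

-- return ''.join(pieces)
def hangman_alt (x : String) : String :=
  String.mk (runScanB x.toList).flatten

-- ===== PRECONDITION & SPEC =====
def Spec_hangman (x : String) (out : String) : Prop := out = hangman_alt x
instance (x : String) (out : String) : Decidable (Spec_hangman x out) := by unfold Spec_hangman; infer_instance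

-- ===== CLAIM (what is proved, stated in full; the proofs are below) =====
def Claim_equal_hangman : Prop := ∀ (x : String), Dom_hangman x → Spec_hangman x (hangman x)

-- ===== LEMMAS AND PROOFS =====
theorem char_eq_iff_toNat (c d : Char) : c = d ↔ c.toNat = d.toNat := by
  rw [Char.ext_iff, UInt32.ext_iff]; rfl

theorem mem_lettersA_iff (c : Char) :
    c ∈ lettersA ↔ ((65 ≤ c.toNat ∧ c.toNat ≤ 90) ∨ (97 ≤ c.toNat ∧ c.toNat ≤ 122)) := by
  simp only [lettersA, List.mem_cons, List.not_mem_nil, or_false, char_eq_iff_toNat]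
  simp
  omega

theorem isIn_eq_isLetterB (c : Char) :
    PySem.Chars.isIn [c] lettersA = isLetterB c := by
  by_cases h : (65 ≤ c.toNat ∧ c.toNat ≤ 90) ∨ (97 ≤ c.toNat ∧ c.toNat ≤ 122)
  · have hin : PySem.Chars.isIn [c] lettersA = true := by
      rw [PySem.Chars.isIn_iff_infix, List.singleton_infix_iff, mem_lettersA_iff]; exact h
    have hlet : isLetterB c = true := by simp only [isLetterB, Bool.or_eq_true, Bool.and_eq_true, decide_eq_true_eq]; omega
    rw [hin, hlet]
  · have hout : PySem.Chars.isIn [c] lettersA = false := by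
      rw [PySem.Chars.isIn_eq_false_iff, List.singleton_infix_iff, mem_lettersA_iff]; exact h
    have hlet : isLetterB c = false := by
      simp only [isLetterB, Bool.or_eq_false_iff, Bool.and_eq_false_iff,
        decide_eq_false_iff_not, not_le]
      omega
    rw [hout, hlet]

def maskB (c : Char) : Char := if isLetterB c then '_' else c

theorem map_mask_takeWhile_true (cs : List Char) :
    (cs.takeWhile isLetterB).map maskB
      = List.replicate (cs.takeWhile isLetterB).length '_' := by
  induction cs with
  | nil => simp
  | cons c cs ih =>
    by_cases h : isLetterB c
    · simp [h, maskB, List.replicate_succ, ih]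
    · simp [h]

theorem map_mask_takeWhile_false (cs : List Char) :
    (cs.takeWhile (fun d => !isLetterB d)).map maskB
      = cs.takeWhile (fun d => !isLetterB d) := by
  induction cs with
  | nil => simp
  | cons c cs ih =>
    by_cases h : isLetterB c
    · simp [h]
    · simp [h, maskB, ih]

theorem flatten_runScanB (l : List Char) :
    (runScanB l).flatten = l.map maskB := by
  fun_induction runScanB l with
  | case1 => simp
  | case2 c cs h ih =>
    simp only [List.flatten_cons, ih]
    conv_rhs => rw [List.map_cons,
      ← List.takeWhile_append_dropWhile (p := isLetterB) (l := cs),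
      List.map_append, map_mask_takeWhile_true]
    rw [Nat.add_comm, List.replicate_succ]
    simp [maskB, h]
  | case3 c cs h ih =>
    simp only [List.flatten_cons, ih]
    conv_rhs => rw [List.map_cons,
      ← List.takeWhile_append_dropWhile (p := fun d => !isLetterB d) (l := cs),
      List.map_append, map_mask_takeWhile_false]
    simp [maskB, h]

-- ===== VERDICT (by name: the statement is the Claim_ definition above) =====
theorem hangman_spec : Claim_equal_hangman := by
  intro x _
  unfold Spec_hangman hangman hangman_alt
  rw [flatten_runScanB]
  congr 1
  have hfun : (fun (out : List Char) c =>
        out ++ (if PySem.Chars.isIn [c] lettersA then ['_'] else [c]))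
      = (fun (out : List Char) c => out ++ [maskB c]) := by
    funext out c
    rw [isIn_eq_isLetterB]
    unfold maskB
    by_cases h : isLetterB c <;> simp [h]
  rw [hfun, PySem.List.foldl_append_singleton_eq_map, List.nil_append]
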